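-- pv_equiv track=rewrite | github.com/angelala00/pbc_regulations | pbc_regulations/extractor/text_pipeline.py | _merge_pdf_pages_with_ocr
-- ===== SOURCE A (Python) =====
-- from typing import Any, Callable, Dict, List, Optional, Sequence, Set, Tuple
--
-- def _merge_pdf_pages_with_ocr(
--     existing_pages: List[str],
--     ocr_pages: Dict[int, str],
--     total_pages: Optional[int],
-- ) -> List[str]:
--     merged = list(existing_pages)
--     max_index = max(ocr_pages.keys(), default=-1)
--     required_length = max(len(merged), max_index + 1)
--     if total_pages:
--         required_length = max(required_length, total_pages)
--     if required_length > len(merged):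
--         merged.extend([""] * (required_length - len(merged)))
--     for index, text in ocr_pages.items():
--         if index < 0:
--             continue
--         if index >= len(merged):
--             merged.extend([""] * (index + 1 - len(merged)))
--         normalized = text.replace("\r\n", "\n").replace("\r", "\n")
--         merged[index] = normalized.strip()
--     return merged
-- ===== SOURCE B (Python) =====
-- def _merge_pdf_pages_with_ocr(existing_pages, ocr_pages, total_pages):
--     required_length = max(len(existing_pages), max(ocr_pages.keys(), default=-1) + 1)
--     if total_pages:
--         required_length = max(required_length, total_pages)
--
--     def page_at(i):
--         if i in ocr_pages:
--             return ocr_pages[i].replace("\r\n", "\n").replace("\r", "\n").strip()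
--         return existing_pages[i] if i < len(existing_pages) else ""
--
--     return [page_at(i) for i in range(required_length)]
-- ===== Notes on version B (the rewrite author's own statement) =====
-- stated objective: simpler
-- what changed: Replaces A's copy-pad-then-overwrite-by-dict-iteration (mutating list with in-loop extends) by a single index-driven comprehension that picks each slot's source (OCR text, existing page, or empty) directly.
import Mathlib
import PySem

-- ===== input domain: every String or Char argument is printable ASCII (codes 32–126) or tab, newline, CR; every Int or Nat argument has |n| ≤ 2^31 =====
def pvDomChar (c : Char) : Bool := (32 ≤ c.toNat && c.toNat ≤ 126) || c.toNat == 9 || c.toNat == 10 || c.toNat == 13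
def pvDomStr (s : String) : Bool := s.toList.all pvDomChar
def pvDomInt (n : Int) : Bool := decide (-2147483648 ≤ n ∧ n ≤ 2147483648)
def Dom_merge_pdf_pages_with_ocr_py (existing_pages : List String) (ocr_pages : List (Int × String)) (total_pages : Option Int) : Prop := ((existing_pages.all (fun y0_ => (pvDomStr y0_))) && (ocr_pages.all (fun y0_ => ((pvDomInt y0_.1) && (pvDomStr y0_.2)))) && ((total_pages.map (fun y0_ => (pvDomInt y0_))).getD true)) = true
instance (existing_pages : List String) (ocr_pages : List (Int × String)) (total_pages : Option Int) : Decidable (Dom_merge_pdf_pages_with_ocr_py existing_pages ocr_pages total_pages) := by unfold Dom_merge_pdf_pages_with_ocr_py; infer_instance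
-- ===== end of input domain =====

-- B replaces A's copy-pad-then-overwrite-by-dict-iteration with one index-driven pass
-- choosing each slot's source directly (objective: simpler; return value only, A mutates no argument).


-- ===== PORT A =====
-- normalized = text.replace("\r\n","\n").replace("\r","\n"); then .strip()
def pvNorm (t : String) : String :=
  PySem.Str.strip (PySem.Str.replace (PySem.Str.replace t "\r\n" "\n") "\r" "\n")

-- one iteration of A's 'for index, text in ocr_pages.items():' loop body
def pvStepA (m : List String) (p : Int × String) : List String :=
  if p.1 < 0 then m
  else
    let m2 := if (m.length : Int) ≤ p.1 then m ++ List.replicate (p.1 + 1 - (m.length : Int)).toNat "" else m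
    m2.set p.1.toNat (pvNorm p.2)

def merge_pdf_pages_with_ocr_py (existing_pages : List String) (ocr_pages : List (Int × String)) (total_pages : Option Int) : List String :=
  let merged := existing_pages
  let max_index := PySem.List.maxD (ocr_pages.map Prod.fst) (fun k => k) (-1)
  let required_length := max (merged.length : Int) (max_index + 1)
  let required_length :=
    match total_pages with
    | some t => if t ≠ 0 then max required_length t else required_length
    | none => required_length
  let merged :=
    if (merged.length : Int) < required_length then
      merged ++ List.replicate (required_length - (merged.length : Int)).toNat ""
    else merged
  ocr_pages.foldl pvStepA merged

-- ===== PORT B =====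
-- 'i in ocr_pages' / 'ocr_pages[i]' : dict lookup on the association list
def pvPageAtB (existing_pages : List String) (ocr_pages : List (Int × String)) (i : Int) : String :=
  match ocr_pages.find? (fun p => p.1 == i) with
  | some p => pvNorm p.2
  | none => if i < (existing_pages.length : Int) then existing_pages.getD i.toNat "" else ""

def merge_pdf_pages_with_ocr_py_alt (existing_pages : List String) (ocr_pages : List (Int × String)) (total_pages : Option Int) : List String :=
  let required_length := max (existing_pages.length : Int)
      (PySem.List.maxD (ocr_pages.map Prod.fst) (fun k => k) (-1) + 1)
  let required_length :=
    match total_pages with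
    | some t => if t ≠ 0 then max required_length t else required_length
    | none => required_length
  (PySem.List.pyRange 0 required_length 1).map (pvPageAtB existing_pages ocr_pages)

-- ===== PRECONDITION & SPEC =====
-- Pre_ excludes association lists with duplicate keys: they do not represent any Python dict
-- (the ocr_pages parameter is a dict, whose keys are unique), so no actual call of A reaches them.
def Pre_merge_pdf_pages_with_ocr_py (existing_pages : List String) (ocr_pages : List (Int × String)) (total_pages : Option Int) : Prop :=
  (ocr_pages.map Prod.fst).Nodup
instance (existing_pages : List String) (ocr_pages : List (Int × String)) (total_pages : Option Int) : Decidable (Pre_merge_pdf_pages_with_ocr_py existing_pages ocr_pages total_pages) := by unfold Pre_merge_pdf_pages_with_ocr_py; infer_instance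

def pvWitness_merge_pdf_pages_with_ocr_py : List String × (List (Int × String)) × Option Int :=
  (["a", "b"], [(0, " x\r\ny "), (3, "z\r")], some 5)

def Spec_merge_pdf_pages_with_ocr_py (existing_pages : List String) (ocr_pages : List (Int × String)) (total_pages : Option Int) (out : List String) : Prop := out = merge_pdf_pages_with_ocr_py_alt existing_pages ocr_pages total_pages
instance (existing_pages : List String) (ocr_pages : List (Int × String)) (total_pages : Option Int) (out : List String) : Decidable (Spec_merge_pdf_pages_with_ocr_py existing_pages ocr_pages total_pages out) := by unfold Spec_merge_pdf_pages_with_ocr_py; infer_instance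

-- ===== CLAIM (what is proved, stated in full; the proofs are below) =====
def Claim_equal_merge_pdf_pages_with_ocr_py : Prop := ∀ (existing_pages : List String) (ocr_pages : List (Int × String)) (total_pages : Option Int), Dom_merge_pdf_pages_with_ocr_py existing_pages ocr_pages total_pages → Pre_merge_pdf_pages_with_ocr_py existing_pages ocr_pages total_pages → Spec_merge_pdf_pages_with_ocr_py existing_pages ocr_pages total_pages (merge_pdf_pages_with_ocr_py existing_pages ocr_pages total_pages)

-- ===== LEMMAS AND PROOFS =====

-- every key is ≤ max(keys, default=-1)
lemma pv_le_maxD (ks : List Int) (k : Int) (hk : k ∈ ks) :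
    k ≤ PySem.List.maxD ks (fun x => x) (-1) := by
  unfold PySem.List.maxD
  cases h : PySem.List.max? ks (fun x => x) with
  | none =>
    rw [PySem.List.max?_eq_none_iff] at h
    subst h; simp at hk
  | some m => simpa using PySem.List.max?_isMax h k hk

-- A's overwrite loop, characterised element-wise, when every non-negative key is in range
lemma pvFoldA_spec (l : List (Int × String)) (m : List String)
    (hk : ∀ p ∈ l, 0 ≤ p.1 → p.1 < (m.length : Int))
    (hnd : (l.map Prod.fst).Nodup) :
    (l.foldl pvStepA m).length = m.length ∧
    ∀ i : Nat, (l.foldl pvStepA m).getD i "" =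
      match l.find? (fun p => p.1 == (i : Int)) with
      | some p => pvNorm p.2
      | none => m.getD i "" := by
  induction l generalizing m with
  | nil => simp
  | cons p rest ih =>
    obtain ⟨k, t⟩ := p
    simp only [List.map_cons, List.nodup_cons] at hnd
    by_cases hneg : k < 0
    · have hstep : pvStepA m (k, t) = m := by simp [pvStepA, hneg]
      have ihr := ih m (fun q hq h0 => hk q (List.mem_cons_of_mem _ hq) h0) hnd.2
      refine ⟨by simpa [hstep] using ihr.1, fun i => ?_⟩
      have hne : (k == (i : Int)) = false := by
        rw [beq_eq_false_iff_ne]; omega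
      simp only [List.foldl_cons, hstep, List.find?_cons, hne]
      exact ihr.2 i
    · have hneg' : 0 ≤ k := by omega
      have hklt : k < (m.length : Int) := hk (k, t) List.mem_cons_self hneg'
      have hstep : pvStepA m (k, t) = m.set k.toNat (pvNorm t) := by
        simp only [pvStepA]
        rw [if_neg (by omega), if_neg (by omega)]
      have hlen : (m.set k.toNat (pvNorm t)).length = m.length := by simp
      have ihr := ih (m.set k.toNat (pvNorm t))
        (fun q hq h0 => by rw [hlen]; exact hk q (List.mem_cons_of_mem _ hq) h0) hnd.2
      refine ⟨by simpa [hstep, hlen] using ihr.1, fun i => ?_⟩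
      simp only [List.foldl_cons, hstep, List.find?_cons]
      rw [ihr.2 i]
      by_cases hki : k = (i : Int)
      · have hkeq : (k == (i : Int)) = true := by simpa using hki
        have : rest.find? (fun p => p.1 == (i : Int)) = none := by
          cases hf : rest.find? (fun p => p.1 == (i : Int)) with
          | none => rfl
          | some q =>
            exfalso
            have hmem := List.find?_some hf
            have hqmem := List.mem_of_find?_eq_some hf
            simp only [beq_iff_eq] at hmem
            exact hnd.1 (by rw [hki, ← hmem]; exact List.mem_map_of_mem hqmem)
        simp only [this, hkeq]
        have hkn : k.toNat = i := by omega
        have him : i < m.length := by omega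
        rw [hkn, List.getD_eq_getElem?_getD, List.getElem?_set_self]
        · simp
        · exact him
      · have hkne : (k == (i : Int)) = false := by simpa using hki
        simp only [hkne]
        cases hf : rest.find? (fun p => p.1 == (i : Int)) with
        | some q => rfl
        | none =>
          simp only [List.getD_eq_getElem?_getD]
          rw [List.getElem?_set_ne (by omega)]

-- the padded initial list, element-wise
lemma pvPad_getD (ep : List String) (n : Nat) (i : Nat) :
    (ep ++ List.replicate n "").getD i "" = if (i : Int) < (ep.length : Int) then ep.getD i "" else "" := by
  by_cases h : i < ep.length
  · rw [if_pos (by exact_mod_cast h)]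
    simp [List.getD_eq_getElem?_getD, List.getElem?_append_left h]
  · rw [if_neg (by omega)]
    simp only [List.getD_eq_getElem?_getD, List.getElem?_append_right (by omega : ep.length ≤ i)]
    rcases Nat.lt_or_ge (i - ep.length) n with h2 | h2
    · simp [h2]
    · simp [Nat.not_lt.mpr h2]

-- the whole equivalence, with the (shared) required_length abstracted as R
lemma pv_main (ep : List String) (ocr : List (Int × String)) (R : Int)
    (hnd : (ocr.map Prod.fst).Nodup)
    (hepR : (ep.length : Int) ≤ R)
    (hkR : ∀ p ∈ ocr, 0 ≤ p.1 → p.1 + 1 ≤ R) :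
    ocr.foldl pvStepA
      (if (ep.length : Int) < R then ep ++ List.replicate (R - (ep.length : Int)).toNat "" else ep)
    = (PySem.List.pyRange 0 R 1).map (pvPageAtB ep ocr) := by
  have hR0 : 0 ≤ R := le_trans (by positivity) hepR
  set m0 := (if (ep.length : Int) < R then ep ++ List.replicate (R - (ep.length : Int)).toNat "" else ep) with hm0
  have hm0eq : m0 = ep ++ List.replicate (R - (ep.length : Int)).toNat "" := by
    rw [hm0]; split
    · rfl
    · have : (R - (ep.length : Int)).toNat = 0 := by omega
      simp [this]
  have hm0len : (m0.length : Int) = R := by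
    rw [hm0eq]; simp; omega
  have hkeys : ∀ p ∈ ocr, 0 ≤ p.1 → p.1 < (m0.length : Int) := by
    intro p hp h0
    have := hkR p hp h0
    omega
  obtain ⟨hflen, hfget⟩ := pvFoldA_spec ocr m0 hkeys hnd
  obtain ⟨n, hn⟩ : ∃ n : Nat, R = (n : Int) := ⟨R.toNat, by omega⟩
  rw [hn, PySem.List.pyRange_zero_natCast]
  apply List.ext_getElem
  · simp only [List.length_map, List.length_range]
    omega
  · intro i h1 h2
    simp only [List.length_map, List.length_range] at h2
    have hA : (ocr.foldl pvStepA m0)[i] = (ocr.foldl pvStepA m0).getD i "" := by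
      rw [List.getD_eq_getElem?_getD, List.getElem?_eq_getElem h1]; rfl
    rw [hA, hfget i]
    simp only [List.getElem_map, List.getElem_range]
    unfold pvPageAtB
    cases hf : ocr.find? (fun p => p.1 == (i : Int)) with
    | some p => rfl
    | none =>
      simp only
      rw [hm0eq, pvPad_getD]
      split
      · simp
      · rfl

-- ===== VERDICT (by name: the statement is the Claim_ definition above) =====
theorem merge_pdf_pages_with_ocr_py_spec : Claim_equal_merge_pdf_pages_with_ocr_py := by
  intro ep ocr tp _ hpre
  unfold Spec_merge_pdf_pages_with_ocr_py
  have hkey : ∀ p ∈ ocr, 0 ≤ p.1 →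
      p.1 + 1 ≤ max (ep.length : Int) (PySem.List.maxD (ocr.map Prod.fst) (fun k => k) (-1) + 1) := by
    intro p hp h0
    have h1 : p.1 ≤ PySem.List.maxD (ocr.map Prod.fst) (fun k => k) (-1) :=
      pv_le_maxD _ p.1 (List.mem_map_of_mem hp)
    exact le_trans (by omega) (le_max_right _ _)
  cases tp with
  | none =>
    exact pv_main ep ocr
      (max (ep.length : Int) (PySem.List.maxD (ocr.map Prod.fst) (fun k => k) (-1) + 1))
      hpre (le_max_left _ _) hkey
  | some t =>
    refine pv_main ep ocr
      (if t ≠ 0 then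
        max (max (ep.length : Int) (PySem.List.maxD (ocr.map Prod.fst) (fun k => k) (-1) + 1)) t
       else max (ep.length : Int) (PySem.List.maxD (ocr.map Prod.fst) (fun k => k) (-1) + 1))
      hpre ?_ ?_
    · split
      · exact le_trans (le_max_left _ _) (le_max_left _ _)
      · exact le_max_left _ _
    · intro p hp h0
      split
      · exact le_trans (hkey p hp h0) (le_max_left _ _)
      · exact hkey p hp h0
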